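-- pv_equiv track=rewrite | github.com/humbertodias/challenges | palindrome-prime/pprime-v3.py | next_higher_odd_length_palindrome
-- ===== SOURCE A (Python) =====
-- def next_higher_odd_length_palindrome(num):
--     length=len(str(num))
--     oddDigits=(length%2!=0)
--     leftHalf=get_left_half(num)
--     middle=get_middle(num)
--     if oddDigits:
--         increment=pow(10, length//2)
--         newNum=int(leftHalf+middle+leftHalf[::-1])
--     else:
--         increment=int(1.1*pow(10, length//2))
--         newNum=int(leftHalf+leftHalf[::-1])
--     if newNum>num:
--         return newNum
--     if middle!='9':
--         return newNum+increment
--     else: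
--         return next_higher_odd_length_palindrome(round_up(num))
--
-- def get_left_half(num):
--     return str(num)[:len(str(num))//2]
--
-- def get_middle(num):
--     return str(num)[(len(str(num))-1)//2]
--
-- def round_up(num):
--     length=len(str(num))
--     increment=pow(10,((length//2)+1))
--     return ((num//increment)+1)*increment
-- ===== SOURCE B (Python) =====
-- def next_higher_odd_length_palindrome(num):
--     while True:
--         s = str(num)
--         m = len(s) // 2
--         head = s[:len(s) - m]              # left half, plus the middle digit when the length is odd
--         pal = int(head + s[:m][::-1])      # one mirror construction covers both parities
--         if pal > num:
--             return pal
--         if head[-1] != '9':                # the middle digit (last char of head)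
--             return pal + (10 ** m if len(s) % 2 else 11 * 10 ** (m - 1))
--         step = 10 ** (m + 1)
--         num = (num // step + 1) * step
-- ===== Notes on version B (the rewrite author's own statement) =====
-- stated objective: simpler
-- what changed: The recursion becomes a loop with no helper functions, the two parity branches are merged into one mirror construction from the first ceil(n/2) characters, the middle digit is read as the last character of that head instead of by a computed index, and the float-based even-length increment int(1.1*10**k) is replaced by exact integer arithmetic 11*10**(k-1).
import Mathlib
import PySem

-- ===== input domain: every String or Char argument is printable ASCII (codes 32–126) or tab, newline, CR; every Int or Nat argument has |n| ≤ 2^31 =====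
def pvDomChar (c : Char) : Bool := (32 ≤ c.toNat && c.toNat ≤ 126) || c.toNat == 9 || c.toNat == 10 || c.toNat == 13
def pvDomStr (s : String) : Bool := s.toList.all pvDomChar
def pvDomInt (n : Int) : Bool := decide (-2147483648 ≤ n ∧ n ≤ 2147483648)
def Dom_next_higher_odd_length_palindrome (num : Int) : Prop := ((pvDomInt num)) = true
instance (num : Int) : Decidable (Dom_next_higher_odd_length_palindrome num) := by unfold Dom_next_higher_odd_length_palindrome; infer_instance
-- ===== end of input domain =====

-- B replaces A's recursion + helpers by a single loop with one merged mirror construction and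
-- integer-only increments (objective: simpler); A = B is proved for all num ≥ 0 in the domain.


-- ===== PORT A =====
-- str(num) is ported as PySem.Int.toChars (code points; PySem.Int.toStr = String.ofList ∘ toChars),
-- and all string slicing/indexing/concatenation happens on the List Char side with PySem.List.

-- get_left_half(num) = str(num)[:len(str(num))//2]
def pvGetLeftHalf (num : Int) : List Char :=
  let s := PySem.Int.toChars num
  PySem.List.slice s none (some (PySem.Int.floordiv (s.length : Int) 2))

-- get_middle(num) = str(num)[(len(str(num))-1)//2]; the index is always in range (len ≥ 1),
-- so the IndexError branch (pyGet? = none) is unreachable and the default ' ' is never used.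
def pvGetMiddle (num : Int) : Char :=
  let s := PySem.Int.toChars num
  (PySem.List.pyGet? s (PySem.Int.floordiv ((s.length : Int) - 1) 2)).getD ' '

-- round_up(num); the exponent (length//2)+1 is ≥ 1, so .toNat is exact
def pvRoundUp (num : Int) : Int :=
  let length : Int := ((PySem.Int.toChars num).length : Int)
  let increment : Int := (10 : Int) ^ (PySem.Int.floordiv length 2 + 1).toNat
  (PySem.Int.floordiv num increment + 1) * increment

-- increment = int(1.1*pow(10, k)) of the even branch, ported by hand (PySem has no floats):
-- exact for k ≤ 16 (CPython's 1.1*10**k truncates to 11*10**(k-1) there); for |num| ≤ 2^31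
-- only k ≤ 5 is ever reached, so the port is exact on the claimed domain.
def pvFloat11 (k : Nat) : Int := if k = 0 then 1 else 11 * 10 ^ (k - 1)

-- int(cs): PySem.Int.ofChars?; none (ValueError, reached only for num < 0) defaults to 0,
-- excluded by Pre_. The fuel argument only makes the recursion structurally total: on num ≥ 0
-- the recursion depth is at most 2, so fuel 12 is never exhausted on the claimed domain.
def pvNextPalA : Nat → Int → Int
  | 0, _ => 0
  | fuel + 1, num =>
    let length : Int := ((PySem.Int.toChars num).length : Int)
    let leftHalf := pvGetLeftHalf num
    let middle := pvGetMiddle num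
    if PySem.Int.mod length 2 ≠ 0 then
      let increment : Int := (10 : Int) ^ (PySem.Int.floordiv length 2).toNat
      let newNum : Int :=
        (PySem.Int.ofChars? (leftHalf ++ [middle] ++
          ((PySem.List.slice? leftHalf none none (-1)).getD []))).getD 0
      if newNum > num then newNum
      else if middle ≠ '9' then newNum + increment
      else pvNextPalA fuel (pvRoundUp num)
    else
      let increment : Int := pvFloat11 (PySem.Int.floordiv length 2).toNat
      let newNum : Int :=
        (PySem.Int.ofChars? (leftHalf ++
          ((PySem.List.slice? leftHalf none none (-1)).getD []))).getD 0
      if newNum > num then newNum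
      else if middle ≠ '9' then newNum + increment
      else pvNextPalA fuel (pvRoundUp num)

def next_higher_odd_length_palindrome (num : Int) : Int := pvNextPalA 12 num

-- ===== PORT B =====
-- Same conventions; head[-1] is pyGet? head (-1) (head is never empty on num ≥ 0, so the
-- default ' ' is unreachable); the while-True loop becomes fuel recursion (fuel 12, never
-- exhausted on the claimed domain: at most one round-up iteration happens).
def pvNextPalB : Nat → Int → Int
  | 0, _ => 0
  | fuel + 1, num =>
    let s := PySem.Int.toChars num
    let m : Int := PySem.Int.floordiv (s.length : Int) 2
    let head := PySem.List.slice s none (some ((s.length : Int) - m))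
    let pal : Int :=
      (PySem.Int.ofChars? (head ++
        ((PySem.List.slice? (PySem.List.slice s none (some m)) none none (-1)).getD []))).getD 0
    if pal > num then pal
    else if (PySem.List.pyGet? head (-1)).getD ' ' ≠ '9' then
      pal + (if PySem.Int.mod (s.length : Int) 2 ≠ 0 then (10 : Int) ^ m.toNat
             else 11 * (10 : Int) ^ (m - 1).toNat)
    else
      let step : Int := (10 : Int) ^ (m + 1).toNat
      pvNextPalB fuel ((PySem.Int.floordiv num step + 1) * step)

def next_higher_odd_length_palindrome_alt (num : Int) : Int := pvNextPalB 12 num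

-- ===== PRECONDITION & SPEC =====
-- Pre_ excludes num < 0, on which Python A raises ValueError (int() of a string with an
-- interior '-' coming from the mirrored sign).
def Pre_next_higher_odd_length_palindrome (num : Int) : Prop := 0 ≤ num
instance (num : Int) : Decidable (Pre_next_higher_odd_length_palindrome num) := by unfold Pre_next_higher_odd_length_palindrome; infer_instance
def pvWitness_next_higher_odd_length_palindrome : Int := 192

def Spec_next_higher_odd_length_palindrome (num : Int) (out : Int) : Prop := out = next_higher_odd_length_palindrome_alt num
instance (num : Int) (out : Int) : Decidable (Spec_next_higher_odd_length_palindrome num out) := by unfold Spec_next_higher_odd_length_palindrome; infer_instance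

-- ===== CLAIM (what is proved, stated in full; the proofs are below) =====
def Claim_equal_next_higher_odd_length_palindrome : Prop := ∀ (num : Int), Dom_next_higher_odd_length_palindrome num → Pre_next_higher_odd_length_palindrome num → Spec_next_higher_odd_length_palindrome num (next_higher_odd_length_palindrome num)

-- ===== LEMMAS AND PROOFS =====

-- Nat.toDigitsCore with positive fuel never returns []
lemma pvToDigitsCore_ne_nil (b : Nat) : ∀ (f n : Nat) (ds : List Char),
    Nat.toDigitsCore b (f + 1) n ds ≠ [] := by
  intro f
  induction f with
  | zero => intro n ds; simp [Nat.toDigitsCore]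
  | succ f ih =>
    intro n ds
    simp only [Nat.toDigitsCore]
    split
    · simp
    · exact ih _ _

lemma pvToChars_ne_nil (num : Int) : PySem.Int.toChars num ≠ [] := by
  unfold PySem.Int.toChars
  split
  · simp
  · exact pvToDigitsCore_ne_nil 10 _ _ []

-- The step equality: for num ≥ 0 both fuel recursions agree, by induction on fuel.
lemma pvStep_eq : ∀ (fuel : Nat) (num : Int), 0 ≤ num →
    pvNextPalA fuel num = pvNextPalB fuel num := by
  intro fuel
  induction fuel with
  | zero => intro num _; rfl
  | succ fuel ih =>
    intro num hnum
    have hsne := pvToChars_ne_nil num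
    have hn : 0 < (PySem.Int.toChars num).length := List.length_pos_iff.mpr hsne
    simp only [pvNextPalA, pvNextPalB, pvGetLeftHalf, pvGetMiddle]
    set s := PySem.Int.toChars num with hs
    set n := s.length with hnl
    have h1 : PySem.Int.floordiv (n : Int) 2 = ((n / 2 : Nat) : Int) := by
      rw [PySem.Int.floordiv_eq_ediv_of_pos (by norm_num : (0:Int) < 2)]; omega
    have h2 : PySem.Int.floordiv ((n : Int) - 1) 2 = (((n - 1) / 2 : Nat) : Int) := by
      rw [PySem.Int.floordiv_eq_ediv_of_pos (by norm_num : (0:Int) < 2)]; omega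
    have h3 : PySem.Int.mod (n : Int) 2 = ((n % 2 : Nat) : Int) := by
      rw [PySem.Int.mod_eq_emod_of_pos (by norm_num : (0:Int) < 2)]; omega
    have h4 : ((n : Int) - ((n / 2 : Nat) : Int)) = ((n - n / 2 : Nat) : Int) := by omega
    rw [h1, h2, h3, h4]
    simp only [PySem.List.slice_to_natCast]
    have hrev : ∀ xs : List Char, (PySem.List.slice? xs none none (-1)).getD [] = xs.reverse := by
      intro xs; simp [pysem]
    simp only [hrev]
    have hmidA : (PySem.List.pyGet? s (((n - 1) / 2 : Nat) : Int)).getD ' ' = s.getD ((n - 1) / 2) ' ' := by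
      rw [PySem.List.pyGet?_natCast, List.getD_eq_getElem?_getD]
    have hlast : (PySem.List.pyGet? (s.take (n - n / 2)) (-1)).getD ' ' = s.getD (n - n / 2 - 1) ' ' := by
      rw [PySem.List.pyGet?_neg_one, List.getLast?_eq_getElem?]
      simp only [List.length_take]
      have hix : min (n - n / 2) n - 1 = n - n / 2 - 1 := by omega
      rw [hix, List.getElem?_take_of_lt (by omega), List.getD_eq_getElem?_getD]
    have hstep : 0 ≤ (PySem.Int.floordiv num ((10:Int) ^ (((n / 2 : Nat) : Int) + 1).toNat) + 1) *
        (10:Int) ^ (((n / 2 : Nat) : Int) + 1).toNat := by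
      have hp : (0:Int) < (10:Int) ^ (((n / 2 : Nat) : Int) + 1).toNat := by positivity
      rw [PySem.Int.floordiv_eq_ediv_of_pos hp]
      have := Int.ediv_nonneg hnum hp.le
      exact mul_nonneg (by omega) hp.le
    have hru : pvRoundUp num = (PySem.Int.floordiv num ((10:Int) ^ (((n / 2 : Nat) : Int) + 1).toNat) + 1) *
        (10:Int) ^ (((n / 2 : Nat) : Int) + 1).toNat := by
      simp only [pvRoundUp, ← hs, ← hnl, h1]
    rw [hmidA, hlast, hru]
    by_cases hpar : n % 2 = 0
    · -- even length
      have hee : n - n / 2 = n / 2 := by omega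
      have hmi : (n - 1) / 2 = n - n / 2 - 1 := by omega
      have hinc : pvFloat11 (((n / 2 : Nat) : Int)).toNat =
          11 * (10:Int) ^ ((((n / 2 : Nat) : Int)) - 1).toNat := by
        simp only [pvFloat11, Int.toNat_natCast]
        rw [if_neg (by omega : ¬ n / 2 = 0)]
        congr 2
        omega
      rw [hpar]
      simp only [Nat.cast_zero, ne_eq, not_true_eq_false, if_false]
      rw [hmi, hee, hinc]
      split_ifs with hgt hne
      all_goals first | rfl | exact ih _ hstep
    · -- odd length
      have hpar1 : n % 2 = 1 := by omega
      have htk : s.take (n - n / 2) = s.take (n / 2) ++ [s.getD (n / 2) ' '] := by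
        rw [show n - n / 2 = n / 2 + 1 from by omega, List.take_add_one,
          List.getElem?_eq_getElem (by omega), List.getD_eq_getElem _ _ (by omega)]
        rfl
      have hmi : (n - 1) / 2 = n / 2 := by omega
      have hmi2 : n - n / 2 - 1 = n / 2 := by omega
      rw [hpar1]
      simp only [Nat.cast_one, ne_eq, one_ne_zero, not_false_eq_true, if_true]
      rw [htk, hmi, hmi2]
      simp only [List.append_assoc, List.singleton_append]
      split_ifs with hgt hne
      all_goals first | rfl | exact ih _ hstep

-- ===== VERDICT (by name: the statement is the Claim_ definition above) =====
theorem next_higher_odd_length_palindrome_spec : Claim_equal_next_higher_odd_length_palindrome := by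
  intro num _ hpre
  unfold Spec_next_higher_odd_length_palindrome next_higher_odd_length_palindrome next_higher_odd_length_palindrome_alt
  exact pvStep_eq 12 num hpre
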